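-- pv_equiv track=rewrite | github.com/jordanyaaron/jobzipa-backend | api/v1/jobs_api/utils/generators.py | generate_company_code
-- ===== SOURCE A (Python) =====
-- def generate_company_code(name):
--     ignore = ["LTD", "LIMITED", "PLC"]
--
--     words = name.upper().split()
--     words = [w for w in words if w not in ignore]
--
--     code = "-".join(words)
--
--     if len(code) <= 50:
--         return code
--
--     # 🔥 smart trimming word by word
--     result = []
--     total_length = 0
--
--     for w in words:
--         extra = len(w) + (1 if result else 0)  # dash
--
--         if total_length + extra > 50:
--             break
--
--         result.append(w)
--         total_length += extra
--
--     return "-".join(result)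
-- ===== SOURCE B (Python) =====
-- def _trim(words):
--     code = "-".join(words)
--     if len(code) <= 50:
--         return code
--     return _trim(words[:-1])
--
--
-- def generate_company_code(name):
--     ignore = ["LTD", "LIMITED", "PLC"]
--
--     words = [w for w in name.upper().split() if w not in ignore]
--
--     return _trim(words)
-- ===== Notes on version B (the rewrite author's own statement) =====
-- stated objective: simpler
-- what changed: Replaces the forward greedy word-accumulator loop with state (result list, running length) by a short recursion that drops the last word (words[:-1]) until the dash-join fits in 50 characters; no accumulator or length bookkeeping.
import Mathlib
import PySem

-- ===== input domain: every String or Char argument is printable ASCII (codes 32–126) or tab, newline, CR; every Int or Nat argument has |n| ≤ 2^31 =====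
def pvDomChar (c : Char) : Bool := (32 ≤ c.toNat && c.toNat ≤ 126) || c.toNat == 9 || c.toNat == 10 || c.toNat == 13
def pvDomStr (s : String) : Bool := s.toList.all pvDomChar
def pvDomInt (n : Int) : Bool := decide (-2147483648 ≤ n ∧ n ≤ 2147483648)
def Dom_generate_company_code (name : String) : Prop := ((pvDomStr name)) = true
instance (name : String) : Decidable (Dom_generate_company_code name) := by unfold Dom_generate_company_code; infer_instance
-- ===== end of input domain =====

-- B replaces A's forward greedy accumulator loop by a recursion that drops the last word
-- until the dash-join fits in 50 characters (simpler decomposition, not faster).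

-- ===== PORT A =====
-- the word-by-word trimming loop of A (result list, total_length accumulator, early break)
def pvTrimLoopA : List String → List String → Int → List String
  | [], result, _ => result
  | w :: ws, result, total_length =>
    let extra := PySem.Str.len w + (if result ≠ [] then 1 else 0)
    if total_length + extra > 50 then result
    else pvTrimLoopA ws (result ++ [w]) (total_length + extra)

def generate_company_code (name : String) : String :=
  let ignore : List String := ["LTD", "LIMITED", "PLC"]
  let words := (PySem.Str.split₀ (PySem.Str.upper name)).filter (fun w => !(ignore.contains w))
  let code := PySem.Str.join "-" words
  if PySem.Str.len code ≤ 50 then code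
  else PySem.Str.join "-" (pvTrimLoopA words [] 0)

-- ===== PORT B =====
-- helper _trim of Source B: drop the last word (words[:-1]) until the join fits
def pvTrimB (words : List String) : String :=
  let code := PySem.Str.join "-" words
  if PySem.Str.len code ≤ 50 then code
  else pvTrimB (PySem.List.slice words none (some (-1)))
termination_by words.length
decreasing_by
  rename_i h
  rw [PySem.List.slice_to_neg_one]
  cases words with
  | nil =>
    exfalso
    apply h
    simp [code, PySem.Str.len_eq, PySem.Str.toList_join, PySem.Chars.join_nil]
  | cons w ws => simp

def generate_company_code_alt (name : String) : String :=
  let ignore : List String := ["LTD", "LIMITED", "PLC"]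
  let words := (PySem.Str.split₀ (PySem.Str.upper name)).filter (fun w => !(ignore.contains w))
  pvTrimB words

-- ===== PRECONDITION & SPEC =====
def Spec_generate_company_code (name : String) (out : String) : Prop := out = generate_company_code_alt name
instance (name : String) (out : String) : Decidable (Spec_generate_company_code name out) := by unfold Spec_generate_company_code; infer_instance

-- ===== CLAIM (what is proved, stated in full; the proofs are below) =====
def Claim_equal_generate_company_code : Prop := ∀ (name : String), Dom_generate_company_code name → Spec_generate_company_code name (generate_company_code name)

-- ===== LEMMAS AND PROOFS =====

-- length of "-".join(ws): first word costs its length, every later word costs length+1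
def pvWcost (ws : List String) : Nat := (ws.map (fun w => w.length + 1)).sum

def pvJlen : List String → Nat
  | [] => 0
  | w :: ws => w.length + pvWcost ws

-- the greedy fitting prefix, in front-recursion form (n = characters already used)
def pvGrab : List String → Nat → List String
  | [], _ => []
  | w :: ws, n => if 50 < n + w.length + 1 then [] else w :: pvGrab ws (n + w.length + 1)

def pvFront : List String → List String
  | [] => []
  | w :: ws => if 50 < w.length then [] else w :: pvGrab ws w.length

lemma pvGrab_cons (w : String) (ws : List String) (n : Nat) :
    pvGrab (w :: ws) n = if 50 < n + w.length + 1 then [] else w :: pvGrab ws (n + w.length + 1) := by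
  rw [pvGrab]

lemma pvJoinC_len (ws : List String) :
    (PySem.Chars.join "-".toList (ws.map String.toList)).length = pvJlen ws := by
  induction ws with
  | nil => simp [PySem.Chars.join_nil, pvJlen]
  | cons w ws ih =>
    cases ws with
    | nil => simp [PySem.Chars.join_singleton, pvJlen, pvWcost]
    | cons v vs =>
      simp only [List.map_cons] at ih ⊢
      rw [PySem.Chars.join_cons_cons]
      simp only [List.length_append, ih]
      have hsep : ("-".toList).length = 1 := by decide
      simp only [hsep, pvJlen, pvWcost, List.map_cons, List.sum_cons, String.length_toList]
      omega

lemma pvJoin_len (ws : List String) :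
    PySem.Str.len (PySem.Str.join "-" ws) = (pvJlen ws : Int) := by
  rw [PySem.Str.len_eq, PySem.Str.toList_join, pvJoinC_len]

lemma pvGrab_all (ws : List String) (n : Nat) (h : n + pvWcost ws ≤ 50) : pvGrab ws n = ws := by
  induction ws generalizing n with
  | nil => rfl
  | cons w ws ih =>
    simp only [pvWcost, List.map_cons, List.sum_cons] at h
    rw [pvGrab_cons, if_neg (by omega)]
    rw [ih (n + w.length + 1) (by simp only [pvWcost]; omega)]

lemma pvGrab_dropLast (ws : List String) (n : Nat) (h : 50 < n + pvWcost ws) :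
    pvGrab ws n = pvGrab ws.dropLast n := by
  induction ws generalizing n with
  | nil => rfl
  | cons w ws ih =>
    cases ws with
    | nil =>
      simp only [pvWcost, List.map_cons, List.map_nil, List.sum_cons, List.sum_nil] at h
      rw [pvGrab_cons, if_pos (by omega)]
      rfl
    | cons v vs =>
      rw [List.dropLast_cons_of_ne_nil (by simp)]
      rw [pvGrab_cons w (v :: vs) n, pvGrab_cons w ((v :: vs).dropLast) n]
      by_cases hw : 50 < n + w.length + 1
      · rw [if_pos hw, if_pos hw]
      · rw [if_neg hw, if_neg hw]
        congr 1
        apply ih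
        simp only [pvWcost, List.map_cons, List.sum_cons] at h ⊢
        omega

lemma pvFront_all (ws : List String) (h : pvJlen ws ≤ 50) : pvFront ws = ws := by
  cases ws with
  | nil => rfl
  | cons w ws =>
    simp only [pvJlen] at h
    rw [pvFront, if_neg (by omega)]
    rw [pvGrab_all ws w.length (by omega)]

lemma pvFront_dropLast (ws : List String) (h : 50 < pvJlen ws) :
    pvFront ws = pvFront ws.dropLast := by
  cases ws with
  | nil => simp [pvJlen] at h
  | cons w ws =>
    cases ws with
    | nil =>
      simp only [pvJlen, pvWcost, List.map_nil, List.sum_nil] at h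
      rw [pvFront, if_pos (by omega)]
      rfl
    | cons v vs =>
      rw [List.dropLast_cons_of_ne_nil (by simp)]
      simp only [pvJlen] at h
      rw [pvFront, pvFront]
      by_cases hw : 50 < w.length
      · rw [if_pos hw, if_pos hw]
      · rw [if_neg hw, if_neg hw]
        congr 1
        exact pvGrab_dropLast _ _ (by omega)

lemma pvJlen_append_singleton (res : List String) (w : String) (h : res ≠ []) :
    pvJlen (res ++ [w]) = pvJlen res + w.length + 1 := by
  cases res with
  | nil => exact absurd rfl h
  | cons r rs =>
    simp only [List.cons_append, pvJlen, pvWcost, List.map_append, List.sum_append,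
      List.map_cons, List.map_nil, List.sum_cons, List.sum_nil]
    omega

lemma pvTrimLoopA_spec (ws : List String) : ∀ (res : List String), res ≠ [] →
    pvTrimLoopA ws res (pvJlen res : Int) = res ++ pvGrab ws (pvJlen res) := by
  induction ws with
  | nil => intro res _; simp [pvTrimLoopA, pvGrab]
  | cons w ws ih =>
    intro res hres
    rw [pvTrimLoopA, pvGrab_cons]
    simp only [if_pos hres, PySem.Str.len_eq, String.length_toList]
    by_cases hcond : 50 < pvJlen res + w.length + 1
    · rw [if_pos (by omega), if_pos hcond, List.append_nil]
    · rw [if_neg (by omega), if_neg hcond]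
      have h2 : ((pvJlen res : Int) + ((w.length : Int) + 1)) = ((pvJlen (res ++ [w]) : Int)) := by
        rw [pvJlen_append_singleton res w hres]; push_cast; ring
      rw [h2, ih (res ++ [w]) (by simp)]
      rw [pvJlen_append_singleton res w hres]
      simp

lemma pvTrimLoopA_front (ws : List String) : pvTrimLoopA ws [] 0 = pvFront ws := by
  cases ws with
  | nil => rfl
  | cons w ws =>
    rw [pvTrimLoopA, pvFront]
    simp only [ne_eq, not_true_eq_false, reduceIte, PySem.Str.len_eq, String.length_toList]
    by_cases hw : 50 < w.length
    · rw [if_pos (by omega), if_pos hw]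
    · rw [if_neg (by omega), if_neg hw]
      have h0 : ((0 : Int) + ((w.length : Int) + 0)) = ((pvJlen [w] : Int)) := by
        simp [pvJlen, pvWcost]
      rw [h0]
      simp only [List.nil_append]
      rw [pvTrimLoopA_spec ws [w] (by simp)]
      simp [pvJlen, pvWcost]

lemma pvTrimB_front (ws : List String) : pvTrimB ws = PySem.Str.join "-" (pvFront ws) := by
  induction hn : ws.length using Nat.strong_induction_on generalizing ws with
  | _ n ih =>
    rw [pvTrimB]
    by_cases h : pvJlen ws ≤ 50
    · rw [if_pos (by rw [pvJoin_len]; exact_mod_cast h), pvFront_all ws h]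
    · rw [if_neg (by rw [pvJoin_len]; omega), PySem.List.slice_to_neg_one]
      have hne : ws ≠ [] := by rintro rfl; simp [pvJlen] at h
      have hlt : ws.dropLast.length < n := by
        rw [← hn, List.length_dropLast]
        have := List.length_pos_iff.mpr hne
        omega
      rw [ih ws.dropLast.length hlt ws.dropLast rfl, pvFront_dropLast ws (by omega)]

-- ===== VERDICT (by name: the statement is the Claim_ definition above) =====
theorem generate_company_code_spec : Claim_equal_generate_company_code := by
  intro name _
  unfold Spec_generate_company_code generate_company_code generate_company_code_alt
  set words := (PySem.Str.split₀ (PySem.Str.upper name)).filter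
      (fun w => !((["LTD", "LIMITED", "PLC"] : List String).contains w)) with hwords
  rw [pvTrimB_front words]
  by_cases h : pvJlen words ≤ 50
  · rw [if_pos (by rw [pvJoin_len]; exact_mod_cast h), pvFront_all words h]
  · rw [if_neg (by rw [pvJoin_len]; exact_mod_cast h), pvTrimLoopA_front words]
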